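-- pv_equiv track=rewrite | github.com/spiaz/advent_of_code_2018 | Day 05/day05.py | react_with_remove
-- ===== SOURCE A (Python) =====
-- from typing import List
--
-- def react_with_remove(polymer: str, rm_char: str) -> int:
--     stack:List[str] = []
--     for c in polymer:
--         if c.lower() == rm_char:
--             continue
--         if len(stack) > 0 and stack[-1].lower() == c.lower() and stack[-1] != c:
--             stack.pop()
--         else:
--             stack.append(c)
--     return len(stack)
-- ===== SOURCE B (Python) =====
-- def react_with_remove(polymer: str, rm_char: str) -> int:
--     # Filter first, then reduce by repeated full left-to-right passes until a
--     # pass removes nothing (fixpoint).  Equivalent to the stack method because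
--     # polymer reduction is confluent.
--     s = [c for c in polymer if c.lower() != rm_char]
--     changed = True
--     while changed:
--         changed = False
--         out = []
--         i = 0
--         n = len(s)
--         while i < n:
--             if i + 1 < n and s[i] != s[i + 1] and s[i].lower() == s[i + 1].lower():
--                 i += 2
--                 changed = True
--             else:
--                 out.append(s[i])
--                 i += 1
--         s = out
--     return len(s)
-- ===== Notes on version B (the rewrite author's own statement) =====
-- stated objective: alternative
-- what changed: Replaces A's single-pass stack reduction by filter-first plus repeated full left-to-right scan passes that cancel adjacent reacting pairs until a fixpoint; the length agrees because polymer reduction is confluent.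
import Mathlib
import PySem

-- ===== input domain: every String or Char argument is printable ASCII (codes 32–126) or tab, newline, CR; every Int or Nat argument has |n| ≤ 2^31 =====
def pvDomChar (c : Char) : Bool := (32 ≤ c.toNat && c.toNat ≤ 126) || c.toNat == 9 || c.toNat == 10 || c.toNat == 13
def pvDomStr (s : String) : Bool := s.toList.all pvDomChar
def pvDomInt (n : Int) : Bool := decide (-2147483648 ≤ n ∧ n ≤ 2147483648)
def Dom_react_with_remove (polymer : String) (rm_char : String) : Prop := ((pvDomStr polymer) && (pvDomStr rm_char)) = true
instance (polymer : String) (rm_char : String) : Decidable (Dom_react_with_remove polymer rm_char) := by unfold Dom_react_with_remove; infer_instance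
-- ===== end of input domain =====

-- B replaces A's stack reduction by filter-first + repeated full-pass scanning to a
-- fixpoint (different decomposition; reduction is confluent, so the length agrees).

-- ===== PORT A =====
-- Python's `x.lower() == y.lower()` / `x != y` on the one-character strings kept in
-- the stack are ported on the character level (exact for single characters).
def react_with_remove (polymer : String) (rm_char : String) : Int :=
  let stack : List Char :=
    polymer.toList.foldl (fun stack c =>
      if PySem.Str.lower (String.mk [c]) == rm_char then stack
      else if stack.length > 0 &&
          ((PySem.List.pyGet? stack (-1)).any fun t =>
            (PySem.Chars.lowerChar t == PySem.Chars.lowerChar c) && (t != c)) then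
        stack.dropLast
      else stack ++ [c]) []
  (stack.length : Int)

-- ===== PORT B =====
-- one left-to-right pass of Source B's inner `while i < n` loop: skips a reacting
-- adjacent pair (setting the changed flag), otherwise copies the character
def onePass : List Char → List Char × Bool
  | [] => ([], false)
  | [a] => ([a], false)
  | a :: b :: t =>
      if a != b && PySem.Chars.lowerChar a == PySem.Chars.lowerChar b then
        ((onePass t).1, true)
      else
        ((a :: (onePass (b :: t)).1), (onePass (b :: t)).2)

-- termination measure for the outer fixpoint loop (cited by reduceLoop)
theorem onePass_length_le (l : List Char) : (onePass l).1.length ≤ l.length := by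
  induction l using onePass.induct with
  | case1 => simp [onePass]
  | case2 => simp [onePass]
  | case3 a b t h ih => have := ih; simp [onePass, h]; omega
  | case4 a b t h ih => have := ih; simp at this; simp [onePass, h]; omega

theorem onePass_length_lt (l : List Char) (h : (onePass l).2 = true) :
    (onePass l).1.length < l.length := by
  induction l using onePass.induct with
  | case1 => simp [onePass] at h
  | case2 => simp [onePass] at h
  | case3 a b t hc ih =>
      have := onePass_length_le t
      simp [onePass, hc]
      omega
  | case4 a b t hc ih =>
      simp only [onePass, if_neg hc] at h ⊢
      simp at h ⊢
      have := ih h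
      simp at this
      omega

-- Source B's outer `while changed` loop
def reduceLoop (s : List Char) : List Char :=
  if h : (onePass s).2 = true then reduceLoop (onePass s).1 else (onePass s).1
termination_by s.length
decreasing_by exact onePass_length_lt s h

def react_with_remove_alt (polymer : String) (rm_char : String) : Int :=
  let s := polymer.toList.filter (fun c => !(PySem.Str.lower (String.mk [c]) == rm_char))
  ((reduceLoop s).length : Int)

-- ===== PRECONDITION & SPEC =====
def Spec_react_with_remove (polymer : String) (rm_char : String) (out : Int) : Prop := out = react_with_remove_alt polymer rm_char
instance (polymer : String) (rm_char : String) (out : Int) : Decidable (Spec_react_with_remove polymer rm_char out) := by unfold Spec_react_with_remove; infer_instance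

-- ===== CLAIM (what is proved, stated in full; the proofs are below) =====
def Claim_equal_react_with_remove : Prop := ∀ (polymer : String) (rm_char : String), Dom_react_with_remove polymer rm_char → Spec_react_with_remove polymer rm_char (react_with_remove polymer rm_char)

-- ===== LEMMAS AND PROOFS =====

-- the reaction predicate, as a Prop-decide Bool, and bridges to both ports' conditions
def reactB (a b : Char) : Bool :=
  decide (PySem.Chars.lowerChar a = PySem.Chars.lowerChar b ∧ a ≠ b)

theorem condA_eq (t c : Char) :
    ((PySem.Chars.lowerChar t == PySem.Chars.lowerChar c) && (t != c)) = reactB t c := by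
  by_cases h1 : PySem.Chars.lowerChar t = PySem.Chars.lowerChar c <;>
    by_cases h2 : t = c <;> simp [reactB, h1, h2]

theorem condB_eq (a b : Char) :
    ((a != b) && (PySem.Chars.lowerChar a == PySem.Chars.lowerChar b)) = reactB a b := by
  by_cases h1 : PySem.Chars.lowerChar a = PySem.Chars.lowerChar b <;>
    by_cases h2 : a = b <;> simp [reactB, h1, h2]

theorem reactB_comm (a b : Char) : reactB a b = reactB b a := by
  by_cases h1 : PySem.Chars.lowerChar a = PySem.Chars.lowerChar b <;>
    by_cases h2 : a = b <;> simp [reactB, h1, h2, eq_comm]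

theorem char_eq_of_toNat (a b : Char) (h : a.toNat = b.toNat) : a = b :=
  Char.ext (UInt32.toNat_inj.mp h)

-- ASCII case-fiber: two distinct characters with equal lower() determine each other
theorem lower_pair {c d : Char} (h : PySem.Chars.lowerChar c = PySem.Chars.lowerChar d)
    (hne : c ≠ d) :
    (65 ≤ c.toNat ∧ c.toNat ≤ 90 ∧ c.toNat + 32 = d.toNat) ∨
    (65 ≤ d.toNat ∧ d.toNat ≤ 90 ∧ d.toNat + 32 = c.toNat) := by
  have hval : ∀ n : Nat, 65 ≤ n → n ≤ 90 → (Char.ofNat (n + 32)).toNat = n + 32 := by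
    intro n h1 h2; rw [Char.toNat_ofNat, if_pos]; exact Or.inl (by omega)
  have hup : ∀ e : Char, PySem.Chars.isupper e = true ↔ (65 ≤ e.toNat ∧ e.toNat ≤ 90) := by
    intro e; simp [PySem.Chars.isupper, Char.le_def, UInt32.le_iff_toNat_le]
  unfold PySem.Chars.lowerChar at h
  by_cases hc : PySem.Chars.isupper c = true <;> by_cases hd : PySem.Chars.isupper d = true
  · rw [if_pos hc, if_pos hd] at h
    have e1 := (hup c).mp hc
    have e2 := (hup d).mp hd
    have hT := congrArg Char.toNat h
    rw [hval c.toNat e1.1 e1.2, hval d.toNat e2.1 e2.2] at hT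
    exact absurd (char_eq_of_toNat c d (by omega)) hne
  · rw [if_pos hc, if_neg hd] at h
    have e1 := (hup c).mp hc
    have hT := congrArg Char.toNat h
    rw [hval c.toNat e1.1 e1.2] at hT
    exact Or.inl ⟨e1.1, e1.2, hT⟩
  · rw [if_neg hc, if_pos hd] at h
    have e2 := (hup d).mp hd
    have hT := congrArg Char.toNat h
    rw [hval d.toNat e2.1 e2.2] at hT
    exact Or.inr ⟨e2.1, e2.2, hT.symm⟩
  · rw [if_neg hc, if_neg hd] at h
    exact absurd h hne

theorem lower_fiber {t a b : Char} (h1 : reactB t a = true) (h2 : reactB b a = true) :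
    t = b := by
  simp only [reactB, decide_eq_true_eq] at h1 h2
  rcases lower_pair h1.1 h1.2 with ⟨x1, x2, x3⟩ | ⟨y1, y2, y3⟩ <;>
    rcases lower_pair h2.1 h2.2 with ⟨u1, u2, u3⟩ | ⟨v1, v2, v3⟩ <;>
    exact char_eq_of_toNat _ _ (by omega)

-- the stack step / run of A, with the stack top at the head
def stepR (st : List Char) (c : Char) : List Char :=
  match st with
  | [] => [c]
  | t :: r => if reactB t c then r else c :: t :: r

def runStack : List Char → List Char → List Char
  | st, [] => st
  | st, c :: l => runStack (stepR st c) l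

-- no two adjacent stack entries react
def noAdj : List Char → Prop
  | t :: u :: r => reactB t u = false ∧ noAdj (u :: r)
  | _ => True

theorem noAdj_step (st : List Char) (c : Char) (h : noAdj st) : noAdj (stepR st c) := by
  match st with
  | [] => simp [stepR, noAdj]
  | t :: r =>
      simp only [stepR]
      split
      · match r with
        | [] => trivial
        | u :: r2 => exact h.2
      · rename_i hnot
        rw [Bool.not_eq_true] at hnot
        exact ⟨by rw [reactB_comm]; exact hnot, h⟩

theorem step_step_cancel (st : List Char) (a b : Char) (h : noAdj st)
    (hr : reactB a b = true) : stepR (stepR st a) b = st := by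
  match st with
  | [] =>
      simp [stepR, hr]
  | t :: r =>
      simp only [stepR]
      by_cases ht : reactB t a = true
      · have htb : b = t := lower_fiber (by rwa [reactB_comm] at hr) ht
        rw [if_pos ht]
        subst htb
        match r with
        | [] => simp [stepR]
        | u :: r2 =>
            have hub : reactB u b = false := by rw [reactB_comm]; exact h.1
            simp [stepR, hub]
      · rw [if_neg ht]
        simp [stepR, hr]

theorem run_skip (st : List Char) (a b : Char) (l : List Char) (h : noAdj st)
    (hr : reactB a b = true) : runStack st (a :: b :: l) = runStack st l := by
  show runStack (stepR (stepR st a) b) l = runStack st l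
  rw [step_step_cancel st a b h hr]

theorem onePass_run (l : List Char) :
    ∀ st, noAdj st → runStack st (onePass l).1 = runStack st l := by
  induction l using onePass.induct with
  | case1 => intro st h; rfl
  | case2 => intro st h; rfl
  | case3 a b t hc ih =>
      intro st h
      have hr : reactB a b = true := by rwa [condB_eq] at hc
      have e : (onePass (a :: b :: t)).1 = (onePass t).1 := by simp [onePass, hc]
      rw [e, ih st h, run_skip st a b t h hr]
  | case4 a b t hc ih =>
      intro st h
      have e : (onePass (a :: b :: t)).1 = a :: (onePass (b :: t)).1 := by
        simp [onePass, hc]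
      rw [e]
      show runStack (stepR st a) (onePass (b :: t)).1 = runStack (stepR st a) (b :: t)
      exact ih (stepR st a) (noAdj_step st a h)

theorem onePass_false_head (a b : Char) (t : List Char)
    (h : (onePass (a :: b :: t)).2 = false) :
    reactB a b = false ∧ (onePass (b :: t)).2 = false := by
  by_cases hc : (a != b && PySem.Chars.lowerChar a == PySem.Chars.lowerChar b) = true
  · simp [onePass, hc] at h
  · rw [Bool.not_eq_true] at hc
    constructor
    · rw [← condB_eq]; exact hc
    · simpa [onePass, hc] using h

theorem onePass_false_eq (l : List Char) (h : (onePass l).2 = false) :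
    (onePass l).1 = l := by
  induction l using onePass.induct with
  | case1 => rfl
  | case2 => rfl
  | case3 a b t hc ih => simp [onePass, hc] at h
  | case4 a b t hc ih =>
      have hf : (onePass (b :: t)).2 = false := by simpa [onePass, hc] using h
      have e : (onePass (a :: b :: t)).1 = a :: (onePass (b :: t)).1 := by
        simp [onePass, hc]
      rw [e, ih hf]

theorem run_irred (l : List Char) :
    ∀ st, (onePass l).2 = false →
      (∀ t r b t', st = t :: r → l = b :: t' → reactB t b = false) →
      runStack st l = l.reverse ++ st := by
  induction l with
  | nil => intro st _ _; rfl
  | cons a l' ih =>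
      intro st hp hb
      have hstep : stepR st a = a :: st := by
        match st with
        | [] => rfl
        | t :: r =>
            have := hb t r a l' rfl rfl
            simp [stepR, this]
      have hl' : (onePass l').2 = false := by
        match l' with
        | [] => rfl
        | b :: t' => exact (onePass_false_head a b t' hp).2
      have hb' : ∀ t r b t', a :: st = t :: r → l' = b :: t' → reactB t b = false := by
        intro t r b t' h1 h2
        cases h1
        subst h2
        exact (onePass_false_head a b t' hp).1
      show runStack (stepR st a) l' = (a :: l').reverse ++ st
      rw [hstep, ih (a :: st) hl' hb']
      simp

theorem reduceLoop_length (s : List Char) :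
    (reduceLoop s).length = (runStack [] s).length := by
  induction s using reduceLoop.induct with
  | case1 s h ih =>
      rw [reduceLoop, dif_pos h, ih, ← onePass_run s [] trivial]
  | case2 s h =>
      rw [reduceLoop, dif_neg h]
      rw [Bool.not_eq_true] at h
      rw [onePass_false_eq s h]
      rw [run_irred s [] h (by intro t r b t' h1 _; cases h1)]
      simp

-- A's fold over the raw string = the same fold over the filtered list
theorem foldl_skip_filter (q : Char → Bool) (f : List Char → Char → List Char) :
    ∀ (l : List Char) (st : List Char),
      List.foldl (fun st c => if q c then st else f st c) st l =
        List.foldl f st (l.filter (fun c => !q c)) := by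
  intro l
  induction l with
  | nil => intro st; rfl
  | cons c l ih =>
      intro st
      by_cases h : q c = true <;> simp [h, ih]

-- A's end-of-list stack step is stepR on the reversed stack
theorem stepA_eq (st : List Char) (c : Char) :
    (if st.length > 0 &&
        ((PySem.List.pyGet? st (-1)).any fun t =>
          (PySem.Chars.lowerChar t == PySem.Chars.lowerChar c) && (t != c)) then
      st.dropLast
    else st ++ [c]) = (stepR st.reverse c).reverse := by
  rcases List.eq_nil_or_concat st with rfl | ⟨r, t, rfl⟩
  · simp [stepR]
  · simp only [List.concat_eq_append]
    have hget : PySem.List.pyGet? (r ++ [t]) (-1) = some t := by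
      simp [PySem.List.pyGet?, PySem.List.pyIdx?]
    rw [hget]
    simp only [List.reverse_append, List.reverse_cons, List.reverse_nil, List.nil_append,
      List.singleton_append, stepR, condA_eq]
    by_cases hr : reactB t c = true
    · simp [hr]
    · simp only [Bool.not_eq_true] at hr
      simp [hr]

theorem foldlA_eq (l : List Char) :
    ∀ st, List.foldl (fun stack c =>
        if stack.length > 0 &&
            ((PySem.List.pyGet? stack (-1)).any fun t =>
              (PySem.Chars.lowerChar t == PySem.Chars.lowerChar c) && (t != c)) then
          stack.dropLast
        else stack ++ [c]) st l = (runStack st.reverse l).reverse := by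
  induction l with
  | nil => intro st; simp [runStack]
  | cons c l ih =>
      intro st
      show List.foldl _ (if st.length > 0 && _ then st.dropLast else st ++ [c]) l = _
      rw [stepA_eq st c, ih, List.reverse_reverse]
      rfl

-- ===== VERDICT (by name: the statement is the Claim_ definition above) =====
theorem react_with_remove_spec : Claim_equal_react_with_remove := by
  intro polymer rm_char _
  simp only [Spec_react_with_remove, react_with_remove, react_with_remove_alt]
  rw [foldl_skip_filter (fun c => PySem.Str.lower (String.mk [c]) == rm_char) _ polymer.toList []]
  rw [foldlA_eq, reduceLoop_length]
  simp
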